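-- pv_equiv track=rewrite | github.com/thebnbrkr/Yenta | yenta/parser.py | get_ordered_nodes
-- ===== SOURCE A (Python) =====
-- from typing import List, Tuple, Optional, Dict
--
-- def get_ordered_nodes(connections: List[Tuple[str, Optional[str], str, Optional[List[str]]]]) -> List[str]:
--     """Extract ordered list of unique nodes from connections."""
--     nodes = []
--     seen = set()
--
--     for source, _, target, _ in connections:
--         if source not in seen:
--             nodes.append(source)
--             seen.add(source)
--         # Don't add "complete" as a node
--         if target != "complete" and target not in seen:
--             nodes.append(target)
--             seen.add(target)
--
--     return nodes
-- ===== SOURCE B (Python) =====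
-- from typing import List, Tuple, Optional
--
-- def get_ordered_nodes(connections: List[Tuple[str, Optional[str], str, Optional[List[str]]]]) -> List[str]:
--     """Map each node to its first-occurrence index by a reversed overwrite pass,
--     then sort the nodes by that index (no seen-set / membership test anywhere)."""
--     candidates = []
--     for source, _, target, _ in connections:
--         candidates.append(source)
--         if target != "complete":
--             candidates.append(target)
--     first = {}
--     for i, x in reversed(list(enumerate(candidates))):
--         first[x] = i
--     return sorted(first, key=first.__getitem__)
-- ===== Notes on version B (the rewrite author's own statement) =====
-- stated objective: alternative
-- what changed: B eliminates the seen-set and every membership test: it enumerates the candidate nodes, assigns each node its first-occurrence index by overwriting a dict while walking the enumeration in reverse, and obtains the output by sorting the distinct nodes by that index.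
import Mathlib
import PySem

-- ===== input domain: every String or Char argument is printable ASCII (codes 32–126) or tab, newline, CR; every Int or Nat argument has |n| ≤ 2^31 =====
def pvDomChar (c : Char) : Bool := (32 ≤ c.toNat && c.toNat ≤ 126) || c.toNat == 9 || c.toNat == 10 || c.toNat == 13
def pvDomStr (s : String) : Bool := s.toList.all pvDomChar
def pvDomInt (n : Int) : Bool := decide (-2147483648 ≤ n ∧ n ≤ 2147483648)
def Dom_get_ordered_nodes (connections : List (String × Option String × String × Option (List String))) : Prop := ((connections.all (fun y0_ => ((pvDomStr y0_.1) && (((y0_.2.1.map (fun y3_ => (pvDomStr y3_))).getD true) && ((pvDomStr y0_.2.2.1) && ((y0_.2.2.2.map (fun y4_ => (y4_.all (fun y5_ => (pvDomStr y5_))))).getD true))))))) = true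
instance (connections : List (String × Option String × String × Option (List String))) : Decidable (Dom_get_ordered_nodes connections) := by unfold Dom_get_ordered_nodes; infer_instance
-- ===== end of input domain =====

-- B drops A's seen-set entirely: it maps each node to its first-occurrence index by a reversed
-- overwrite pass over the enumerated candidates and sorts the distinct nodes by that index
-- (alternative algorithm; same result, not claimed faster).

-- ===== PORT A =====
-- loop body of A's for-loop, named for the proofs
def pvStepA (st : List String × PySem.Set String)
    (c : String × Option String × String × Option (List String)) :
    List String × PySem.Set String :=
  let source := c.1
  let target := c.2.2.1
  let st1 := if ¬ PySem.Set.contains st.2 source then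
      (st.1 ++ [source], PySem.Set.add st.2 source) else st
  if target ≠ "complete" ∧ ¬ PySem.Set.contains st1.2 target then
      (st1.1 ++ [target], PySem.Set.add st1.2 target) else st1

def get_ordered_nodes (connections : List (String × Option String × String × Option (List String))) : List String :=
  (connections.foldl pvStepA ([], PySem.Set.empty)).1

-- ===== PORT B =====
def get_ordered_nodes_alt (connections : List (String × Option String × String × Option (List String))) : List String :=
  -- candidates = []; for source, _, target, _ in connections: append source; if target != "complete": append target
  let candidates := connections.foldl (fun acc c =>
      acc ++ ([c.1] ++ (if c.2.2.1 ≠ "complete" then [c.2.2.1] else []))) []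
  -- first = {}; for i, x in reversed(list(enumerate(candidates))): first[x] = i
  let first := ((PySem.List.enumerate candidates 0).reverse).foldl
      (fun d p => d.insert p.2 p.1) (PySem.Dict.empty : PySem.Dict String Int)
  -- sorted(first, key=first.__getitem__)   (every key is present, so getD is exact here)
  PySem.List.sorted first.keys (fun k => first.getD k 0) false

-- ===== PRECONDITION & SPEC =====
def Spec_get_ordered_nodes (connections : List (String × Option String × String × Option (List String))) (out : List String) : Prop := out = get_ordered_nodes_alt connections
instance (connections : List (String × Option String × String × Option (List String))) (out : List String) : Decidable (Spec_get_ordered_nodes connections out) := by unfold Spec_get_ordered_nodes; infer_instance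

-- ===== CLAIM (what is proved, stated in full; the proofs are below) =====
def Claim_equal_get_ordered_nodes : Prop := ∀ (connections : List (String × Option String × String × Option (List String))), Dom_get_ordered_nodes connections → Spec_get_ordered_nodes connections (get_ordered_nodes connections)

-- ===== LEMMAS AND PROOFS =====

def pvFlat (c : String × Option String × String × Option (List String)) : List String :=
  [c.1] ++ (if c.2.2.1 ≠ "complete" then [c.2.2.1] else [])

-- ---- A-side: A's loop computes the ordered dedup of the flat candidate list ----

lemma pvAdd_pair (n : List String) (x : String) :
    (if ¬ PySem.Set.contains n x then (n ++ [x], PySem.Set.add n x) else ((n, n) : List String × PySem.Set String))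
      = (PySem.Set.add n x, PySem.Set.add n x) := by
  by_cases h : x ∈ n <;> simp [PySem.Set.add, h]

lemma pvStepA_pair (n : List String) (c : String × Option String × String × Option (List String)) :
    pvStepA (n, n) c = ((pvFlat c).foldl PySem.Set.add n, (pvFlat c).foldl PySem.Set.add n) := by
  show (let st1 := if ¬ PySem.Set.contains n c.1 then
          (n ++ [c.1], PySem.Set.add n c.1) else (n, n);
        if c.2.2.1 ≠ "complete" ∧ ¬ PySem.Set.contains st1.2 c.2.2.1 then
          (st1.1 ++ [c.2.2.1], PySem.Set.add st1.2 c.2.2.1) else st1) = _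
  rw [show (if ¬ PySem.Set.contains n c.1 then
          (n ++ [c.1], PySem.Set.add n c.1) else ((n, n) : List String × PySem.Set String))
        = (PySem.Set.add n c.1, PySem.Set.add n c.1) from pvAdd_pair n c.1]
  by_cases htc : c.2.2.1 = "complete"
  · simp [pvFlat, htc]
  · simp only [pvFlat, htc, ne_eq, not_false_iff, true_and,
      List.foldl_cons, List.singleton_append]
    by_cases ht : c.2.2.1 ∈ PySem.Set.add n c.1 <;>
      simp [PySem.Set.add] <;> simp [PySem.Set.add] at ht <;> simp [ht]

lemma pvMainA (conns : List (String × Option String × String × Option (List String)))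
    (nodes : List String) :
    (conns.foldl pvStepA (nodes, nodes)).1 = (conns.flatMap pvFlat).foldl PySem.Set.add nodes := by
  induction conns generalizing nodes with
  | nil => simp
  | cons c rest ih =>
    rw [List.foldl_cons, pvStepA_pair, List.flatMap_cons, List.foldl_append, ih]

lemma pvA_eq_dedup (conns : List (String × Option String × String × Option (List String))) :
    get_ordered_nodes conns = PySem.List.dedup (conns.flatMap pvFlat) := by
  rw [PySem.List.dedup_eq_ofList, PySem.Set.ofList_eq_foldl]
  exact pvMainA conns []

-- ---- B-side: the reversed-overwrite dict maps x to its first index ----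

-- the dict built by B's second loop, as a foldr over the enumerate list
lemma pvDict_get? (xs : List String) (s : Int) (x : String) (hx : x ∈ xs) :
    ((PySem.List.enumerate xs s).foldr (fun p d => d.insert p.2 p.1)
        (PySem.Dict.empty : PySem.Dict String Int)).get? x = some (s + (xs.idxOf x : Int)) := by
  induction xs generalizing s with
  | nil => cases hx
  | cons a rest ih =>
    rw [PySem.List.enumerate_cons, List.foldr_cons, PySem.Dict.get?_insert]
    by_cases h : x = a
    · simp [h, List.idxOf_cons_self]
    · have hxr : x ∈ rest := by cases List.mem_cons.mp hx with
        | inl h' => exact absurd h' h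
        | inr h' => exact h'
      rw [if_neg h, ih (s + 1) hxr]
      have : (a :: rest).idxOf x = rest.idxOf x + 1 := by
        simp [(Ne.symm h)]
      rw [this]
      push_cast
      ring_nf

lemma pvDict_keys (xs : List String) :
    (((PySem.List.enumerate xs 0).reverse).foldl (fun d p => d.insert p.2 p.1)
        (PySem.Dict.empty : PySem.Dict String Int)).keys
      = PySem.Set.ofList xs.reverse := by
  rw [show (fun (d : PySem.Dict String Int) (p : Int × String) => d.insert p.2 p.1)
        = (fun d p => d.insert ((fun (q : Int × String) => q.2) p) ((fun (_ : PySem.Dict String Int) (q : Int × String) => q.1) d p)) from rfl,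
     PySem.Dict.keys_foldl_insert_key, PySem.Dict.keys_empty, PySem.Set.update_nil_left,
     List.map_reverse, PySem.List.map_snd_enumerate]

-- dedup lists first occurrences in increasing index order
lemma pvDedup_pairwise (xs : List String) :
    (PySem.Set.ofList xs).Pairwise (fun a b => xs.idxOf a < xs.idxOf b) := by
  induction xs with
  | nil => simp [PySem.Set.ofList_nil]
  | cons a rest ih =>
    rw [PySem.Set.ofList_cons]
    constructor
    · intro b hb
      have hmem := (PySem.Set.mem_discard _ _ _).mp hb
      have hne : b ≠ a := hmem.2
      simp [List.idxOf_cons_self, Ne.symm hne]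
    · have hsub : List.Sublist (PySem.Set.discard (PySem.Set.ofList rest) a) (PySem.Set.ofList rest) := by
        simp [PySem.Set.discard]
      refine (ih.sublist hsub).imp_of_mem ?_
      intro p q hp hq hlt
      have hpne : p ≠ a := ((PySem.Set.mem_discard _ _ _).mp hp).2
      have hqne : q ≠ a := ((PySem.Set.mem_discard _ _ _).mp hq).2
      simp [Ne.symm hpne, Ne.symm hqne]
      omega

lemma pvMainB (xs : List String) :
    (let first := ((PySem.List.enumerate xs 0).reverse).foldl
        (fun d p => d.insert p.2 p.1) (PySem.Dict.empty : PySem.Dict String Int);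
      PySem.List.sorted first.keys (fun k => first.getD k 0) false)
    = PySem.List.dedup xs := by
  simp only []
  set d := ((PySem.List.enumerate xs 0).reverse).foldl
      (fun d p => d.insert p.2 p.1) (PySem.Dict.empty : PySem.Dict String Int) with hd
  have hget : ∀ x ∈ xs, d.getD x 0 = (xs.idxOf x : Int) := by
    intro x hx
    have : d.get? x = some (0 + (xs.idxOf x : Int)) := by
      rw [hd, List.foldl_reverse]
      exact pvDict_get? xs 0 x hx
    rw [PySem.Dict.getD_eq_get?_getD, this]
    simp
  have hkeys : d.keys = PySem.Set.ofList xs.reverse := pvDict_keys xs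
  have hperm : (PySem.List.dedup xs).Perm d.keys := by
    rw [hkeys]
    refine (List.perm_ext_iff_of_nodup (PySem.List.nodup_dedup xs) (PySem.Set.nodup_ofList _)).mpr ?_
    intro a
    rw [PySem.List.mem_dedup, PySem.Set.mem_ofList, List.mem_reverse]
  have hpw : (PySem.List.dedup xs).Pairwise (fun a b => d.getD a 0 < d.getD b 0) := by
    rw [PySem.List.dedup_eq_ofList]
    refine (pvDedup_pairwise xs).imp_of_mem ?_
    intro p q hp hq hlt
    rw [hget p ((PySem.Set.mem_ofList _ _).mp hp), hget q ((PySem.Set.mem_ofList _ _).mp hq)]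
    exact_mod_cast hlt
  exact PySem.List.sorted_eq_of_perm_of_pairwise_lt _ _ _ hperm hpw

-- ===== VERDICT (by name: the statement is the Claim_ definition above) =====
theorem get_ordered_nodes_spec : Claim_equal_get_ordered_nodes := by
  intro conns _
  unfold Spec_get_ordered_nodes get_ordered_nodes_alt
  rw [PySem.List.foldl_append_eq_flatMap, List.nil_append]
  rw [show (fun (c : String × Option String × String × Option (List String)) =>
        [c.1] ++ (if c.2.2.1 ≠ "complete" then [c.2.2.1] else [])) = pvFlat from rfl]
  rw [pvMainB (conns.flatMap pvFlat)]
  exact pvA_eq_dedup conns
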